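-- pv_equiv track=rewrite | github.com/jacques00100-cell/revenue-rescue | scripts/enrich_leads_v2.py | get_best_email
-- ===== SOURCE A (Python) =====
-- def get_best_email(emails):
--     """Get priority email"""
--     if not emails:
--         return ""
--     priority = ['contact@', 'info@', 'hello@', 'support@', 'admin@', 'office@']
--     for p in priority:
--         for e in emails:
--             if p in e.lower():
--                 return e
--     for e in emails:
--         if 'noreply' not in e.lower():
--             return e
--     return emails[0]
-- ===== SOURCE B (Python) =====
-- def get_best_email(emails):
--     """Get priority email"""
--     if not emails:
--         return ""
--     priority = ['contact@', 'info@', 'hello@', 'support@', 'admin@', 'office@']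
--     best_rank = len(priority)
--     best_email = ""
--     for e in emails:
--         low = e.lower()
--         rank = next((i for i, p in enumerate(priority) if p in low), len(priority))
--         if rank < best_rank:
--             best_rank = rank
--             best_email = e
--     if best_rank < len(priority):
--         return best_email
--     for e in emails:
--         if 'noreply' not in e.lower():
--             return e
--     return emails[0]
-- ===== Notes on version B (the rewrite author's own statement) =====
-- stated objective: alternative
-- what changed: Replaced the priority-outer nested scan (one pass over emails per priority prefix) by a single pass over emails that maintains the best (lowest) priority rank seen so far, with strict-less update so the first email at the minimal rank wins.
import Mathlib
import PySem

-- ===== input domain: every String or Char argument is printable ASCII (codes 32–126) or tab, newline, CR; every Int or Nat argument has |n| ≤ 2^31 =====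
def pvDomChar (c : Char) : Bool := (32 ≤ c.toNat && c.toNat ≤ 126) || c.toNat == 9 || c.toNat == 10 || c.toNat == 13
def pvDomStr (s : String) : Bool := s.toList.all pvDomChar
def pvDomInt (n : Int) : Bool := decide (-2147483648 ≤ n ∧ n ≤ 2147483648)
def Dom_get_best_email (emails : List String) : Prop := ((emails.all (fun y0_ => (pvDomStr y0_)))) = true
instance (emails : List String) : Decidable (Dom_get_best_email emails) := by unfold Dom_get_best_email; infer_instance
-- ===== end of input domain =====

-- B replaces A's priority-outer nested scan by one pass over emails maintaining the best rank (alternative decomposition, same cost class).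

def pvPriority : List String := ["contact@", "info@", "hello@", "support@", "admin@", "office@"]

def pvLow (e : String) : List Char := PySem.Chars.lower e.toList

-- ===== PORT A =====
-- outer loop 'for p in priority' with inner 'for e in emails: if p in e.lower(): return e'
def pvFindPriority (ps : List String) (emails : List String) : Option String :=
  match ps with
  | [] => none
  | p :: rest =>
    match emails.find? (fun e => PySem.Chars.isIn p.toList (pvLow e)) with
    | some e => some e
    | none => pvFindPriority rest emails

def get_best_email (emails : List String) : String :=
  match emails with
  | [] => ""
  | e0 :: _ =>
    match pvFindPriority pvPriority emails with
    | some e => e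
    | none =>
      match emails.find? (fun e => !PySem.Chars.isIn "noreply".toList (pvLow e)) with
      | some e => e
      | none => e0

-- ===== PORT B =====
-- rank of a lowered email: next((i for i,p in enumerate(priority) if p in low), len(priority))
def pvRank (ps : List String) (low : List Char) : Nat :=
  match ps with
  | [] => 0
  | p :: rest => if PySem.Chars.isIn p.toList low then 0 else pvRank rest low + 1

-- loop body: keep (best_rank, best_email) with strict-less update
def pvStep (acc : Nat × String) (e : String) : Nat × String :=
  let r := pvRank pvPriority (pvLow e)
  if r < acc.1 then (r, e) else acc

def get_best_email_alt (emails : List String) : String :=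
  match emails with
  | [] => ""
  | e0 :: _ =>
    let acc := emails.foldl pvStep (pvPriority.length, "")
    if acc.1 < pvPriority.length then acc.2
    else
      match emails.find? (fun e => !PySem.Chars.isIn "noreply".toList (pvLow e)) with
      | some e => e
      | none => e0

-- ===== PRECONDITION & SPEC =====
def Spec_get_best_email (emails : List String) (out : String) : Prop := out = get_best_email_alt emails
instance (emails : List String) (out : String) : Decidable (Spec_get_best_email emails out) := by unfold Spec_get_best_email; infer_instance

-- ===== CLAIM (what is proved, stated in full; the proofs are below) =====
def Claim_equal_get_best_email : Prop := ∀ (emails : List String), Dom_get_best_email emails → Spec_get_best_email emails (get_best_email emails)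

-- ===== LEMMAS AND PROOFS =====

-- rank of e w.r.t. a priority list
def pvRk (ps : List String) (e : String) : Nat := pvRank ps (pvLow e)

-- minimum rank over emails, initialised at d
def pvMn (ps : List String) (emails : List String) (d : Nat) : Nat :=
  emails.foldr (fun e m => min (pvRk ps e) m) d

lemma pvMn_nil (ps : List String) (d : Nat) : pvMn ps [] d = d := rfl

lemma pvMn_cons (ps : List String) (x : String) (es : List String) (d : Nat) :
    pvMn ps (x :: es) d = min (pvRk ps x) (pvMn ps es d) := rfl

lemma pvMn_le (ps : List String) (emails : List String) (d : Nat) : pvMn ps emails d ≤ d := by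
  induction emails with
  | nil => simp [pvMn_nil]
  | cons e es ih => rw [pvMn_cons]; omega

lemma pvMn_le_of_mem {ps : List String} {emails : List String} {d : Nat} {e : String}
    (h : e ∈ emails) : pvMn ps emails d ≤ pvRk ps e := by
  induction emails with
  | nil => cases h
  | cons x es ih =>
    rw [pvMn_cons]
    rcases List.mem_cons.mp h with h' | h'
    · subst h'; omega
    · have := ih h'; omega

lemma pvMn_min (ps : List String) (emails : List String) (a b : Nat) :
    pvMn ps emails (min a b) = min a (pvMn ps emails b) := by
  induction emails with
  | nil => simp [pvMn_nil]
  | cons e es ih => rw [pvMn_cons, pvMn_cons]; omega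

lemma pvMn_mem {ps : List String} {emails : List String} {d : Nat}
    (h : pvMn ps emails d < d) : ∃ e ∈ emails, pvRk ps e = pvMn ps emails d := by
  induction emails with
  | nil => rw [pvMn_nil] at h; omega
  | cons x es ih =>
    rw [pvMn_cons] at h ⊢
    by_cases hlt : pvMn ps es d < d
    · rcases ih hlt with ⟨e, he, hre⟩
      by_cases hx : pvRk ps x ≤ pvMn ps es d
      · exact ⟨x, List.mem_cons_self, by omega⟩
      · exact ⟨e, List.mem_cons_of_mem _ he, by omega⟩
    · exact ⟨x, List.mem_cons_self, by have := pvMn_le ps es d; omega⟩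

-- find? is some when the minimum is attained
lemma find?_rk_isSome {ps : List String} {emails : List String} {d : Nat}
    (h : pvMn ps emails d < d) :
    ∃ v, emails.find? (fun e => pvRk ps e == pvMn ps emails d) = some v := by
  rcases pvMn_mem h with ⟨x, hx, hrx⟩
  have hne : emails.find? (fun e => pvRk ps e == pvMn ps emails d) ≠ none := by
    intro hn
    have := List.find?_eq_none.mp hn x hx
    simp [hrx] at this
  exact Option.ne_none_iff_exists'.mp hne

lemma find?_congr_mem {α : Type} {l : List α} {p q : α → Bool}
    (h : ∀ x ∈ l, p x = q x) : l.find? p = l.find? q := by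
  induction l with
  | nil => rfl
  | cons x xs ih =>
    have hx := h x List.mem_cons_self
    simp only [List.find?, hx]
    cases q x
    · exact ih (fun y hy => h y (List.mem_cons_of_mem _ hy))
    · rfl

lemma find?_rk_cons_ne {ps : List String} (x : String) (es : List String) {m : Nat}
    (h : pvRk ps x ≠ m) :
    (x :: es).find? (fun e => pvRk ps e == m) = es.find? (fun e => pvRk ps e == m) := by
  simp only [List.find?, beq_eq_false_iff_ne.mpr h]

lemma find?_rk_cons_eq {ps : List String} (x : String) (es : List String) {m : Nat}
    (h : pvRk ps x = m) :
    (x :: es).find? (fun e => pvRk ps e == m) = some x := by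
  simp only [List.find?, beq_iff_eq.mpr h]

lemma pvMn_succ {ps : List String} {emails : List String} {d : Nat} {p : String}
    (h : ∀ e ∈ emails, PySem.Chars.isIn p.toList (pvLow e) = false) :
    pvMn (p :: ps) emails (d + 1) = pvMn ps emails d + 1 := by
  induction emails with
  | nil => simp [pvMn_nil]
  | cons x es ih =>
    have hx := h x List.mem_cons_self
    have ihe := ih (fun y hy => h y (List.mem_cons_of_mem _ hy))
    rw [pvMn_cons, pvMn_cons, ihe]
    have : pvRk (p :: ps) x = pvRk ps x + 1 := by
      simp [pvRk, pvRank, hx]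
    rw [this]
    omega

lemma pvRk_cons_eq_zero (p : String) (ps : List String) (e : String) :
    (pvRk (p :: ps) e == 0) = PySem.Chars.isIn p.toList (pvLow e) := by
  simp only [pvRk, pvRank]
  by_cases h : PySem.Chars.isIn p.toList (pvLow e) = true
  · simp [h]
  · simp [h]

-- characterisation of A's nested scan
lemma findPriority_eq (ps : List String) (emails : List String) :
    pvFindPriority ps emails =
      if pvMn ps emails ps.length < ps.length then
        emails.find? (fun e => pvRk ps e == pvMn ps emails ps.length)
      else none := by
  induction ps with
  | nil =>
    simp only [pvFindPriority, List.length_nil]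
    exact (if_neg (Nat.not_lt_zero _)).symm
  | cons p rest ih =>
    simp only [pvFindPriority]
    cases hfind : emails.find? (fun e => PySem.Chars.isIn p.toList (pvLow e)) with
    | some e =>
      have he : e ∈ emails := List.mem_of_find?_eq_some hfind
      have hpe : PySem.Chars.isIn p.toList (pvLow e) = true := by
        simpa using List.find?_some hfind
      have hrk : pvRk (p :: rest) e = 0 := by simp [pvRk, pvRank, hpe]
      have hm : pvMn (p :: rest) emails (p :: rest).length = 0 := by
        have h1 := pvMn_le_of_mem (ps := p :: rest) (d := (p :: rest).length) he
        omega
      rw [if_pos (by rw [hm]; simp), hm]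
      rw [find?_congr_mem (q := fun e => PySem.Chars.isIn p.toList (pvLow e))
        (fun x _ => pvRk_cons_eq_zero p rest x)]
      exact hfind.symm
    | none =>
      have hnone : ∀ e ∈ emails, PySem.Chars.isIn p.toList (pvLow e) = false := by
        intro e he
        simpa using List.find?_eq_none.mp hfind e he
      have hlen : (p :: rest).length = rest.length + 1 := rfl
      rw [hlen, pvMn_succ hnone]
      have hrkeq : ∀ e ∈ emails,
          (pvRk (p :: rest) e == pvMn rest emails rest.length + 1)
          = (pvRk rest e == pvMn rest emails rest.length) := by
        intro e he
        have h0 := hnone e he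
        have : pvRk (p :: rest) e = pvRk rest e + 1 := by simp [pvRk, pvRank, h0]
        rw [this]
        by_cases hq : pvRk rest e = pvMn rest emails rest.length
        · simp [hq]
        · simp [beq_eq_false_iff_ne.mpr hq,
            beq_eq_false_iff_ne.mpr (by omega : pvRk rest e + 1 ≠ pvMn rest emails rest.length + 1)]
      rw [find?_congr_mem hrkeq, ih]
      by_cases h : pvMn rest emails rest.length < rest.length
      · rw [if_pos h, if_pos (by omega)]
      · rw [if_neg h, if_neg (by omega)]

-- characterisation of B's single-pass fold
lemma foldB_eq (emails : List String) (br : Nat) (be : String) :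
    emails.foldl pvStep (br, be) =
      (pvMn pvPriority emails br,
       if pvMn pvPriority emails br < br then
         (emails.find? (fun e => pvRk pvPriority e == pvMn pvPriority emails br)).getD be
       else be) := by
  induction emails generalizing br be with
  | nil => simp [pvMn_nil]
  | cons e es ih =>
    simp only [List.foldl]
    rw [pvMn_cons]
    have hre : pvRk pvPriority e = pvRank pvPriority (pvLow e) := rfl
    by_cases hr : pvRank pvPriority (pvLow e) < br
    · rw [show pvStep (br, be) e = (pvRank pvPriority (pvLow e), e) by simp [pvStep, hr]]
      rw [ih, ← hre]
      have hmin : pvMn pvPriority es (pvRk pvPriority e) =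
          min (pvRk pvPriority e) (pvMn pvPriority es br) := by
        have h1 : pvRk pvPriority e = min (pvRk pvPriority e) br := by omega
        rw [h1, pvMn_min]
        have hle := pvMn_le pvPriority es br
        omega
      rw [hmin]
      by_cases hcase : min (pvRk pvPriority e) (pvMn pvPriority es br) < pvRk pvPriority e
      · -- the minimum lies strictly below e's rank, attained in es
        have hM : min (pvRk pvPriority e) (pvMn pvPriority es br) = pvMn pvPriority es br := by
          omega
        have hlt : pvMn pvPriority es br < br := by omega
        rw [if_pos hcase, if_pos (by omega), hM,
          find?_rk_cons_ne e es (by omega)]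
        rcases find?_rk_isSome (ps := pvPriority) hlt with ⟨v, hv⟩
        rw [hv]
        rfl
      · -- e itself attains the minimum: e is the first match
        have hM : min (pvRk pvPriority e) (pvMn pvPriority es br) = pvRk pvPriority e := by
          omega
        rw [if_neg hcase, if_pos (by omega), hM, find?_rk_cons_eq e es rfl]
        rfl
    · rw [show pvStep (br, be) e = (br, be) by simp [pvStep, hr]]
      rw [ih]
      have hmes_le : pvMn pvPriority es br ≤ br := pvMn_le _ _ _
      have hmin : min (pvRk pvPriority e) (pvMn pvPriority es br) = pvMn pvPriority es br := by
        omega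
      rw [hmin]
      by_cases h : pvMn pvPriority es br < br
      · rw [if_pos h, if_pos h, find?_rk_cons_ne e es (by omega)]
      · rw [if_neg h, if_neg h]

-- ===== VERDICT (by name: the statement is the Claim_ definition above) =====
theorem get_best_email_spec : Claim_equal_get_best_email := by
  intro emails _
  unfold Spec_get_best_email
  cases emails with
  | nil => rfl
  | cons e0 tl =>
    show get_best_email (e0 :: tl) = get_best_email_alt (e0 :: tl)
    simp only [get_best_email, get_best_email_alt]
    rw [foldB_eq, findPriority_eq]
    by_cases h : pvMn pvPriority (e0 :: tl) pvPriority.length < pvPriority.length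
    · rw [if_pos h]
      simp only [if_pos h]
      rcases find?_rk_isSome (ps := pvPriority) h with ⟨v, hv⟩
      rw [hv]
      rfl
    · rw [if_neg h]
      simp only [if_neg h]
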